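-- pv_equiv track=rewrite | github.com/Shomitg/fin-health-calc | flask-app/utils.py | create_input_text_boxes
-- ===== SOURCE A (Python) =====
-- def create_input_text_boxes(names, lookup_dict, suffix='', boxes_per_row=4):
--     html = ''
--     for i, name in enumerate(names):
--         value = lookup_dict[name]
--         display_name = name.replace('_', ' ').title()
--         html += f'\
--             <label for="{name}"><strong>{display_name}:</strong></label>\
--             <input tpye="text" name="{name}" value="{value}">{suffix}\
--         '
--         if i % boxes_per_row == boxes_per_row - 1 and i != len(names)-1:
--             html += '<br><br>'
--     return f'{html}<br>'
-- ===== SOURCE B (Python) =====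
-- def create_input_text_boxes(names, lookup_dict, suffix='', boxes_per_row=4):
--     boxes = []
--     for name in names:
--         value = lookup_dict[name]
--         display_name = name.replace('_', ' ').title()
--         boxes.append(f'\
--             <label for="{name}"><strong>{display_name}:</strong></label>\
--             <input tpye="text" name="{name}" value="{value}">{suffix}\
--         ')
--     rows = [boxes[i:i + boxes_per_row] for i in range(0, len(boxes), boxes_per_row)]
--     return '<br><br>'.join(''.join(row) for row in rows) + '<br>'
-- ===== Notes on version B (the rewrite author's own statement) =====
-- stated objective: simpler
-- what changed: B first builds the list of per-field box strings, then slices it into explicit rows of boxes_per_row joined by '<br><br>', replacing A's flat loop with its index-modulo break test; Pre_ restricts to the natural domain boxes_per_row >= 1 and all names present in lookup_dict (outside it A raises ZeroDivisionError/KeyError or, for negative boxes_per_row, returns an accidental single unbroken row from Python's modulo sign).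
-- outside the precondition, e.g. on create_input_text_boxes([], {}, '', 0): A returns '<br>', B raises ValueError
import Mathlib
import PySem

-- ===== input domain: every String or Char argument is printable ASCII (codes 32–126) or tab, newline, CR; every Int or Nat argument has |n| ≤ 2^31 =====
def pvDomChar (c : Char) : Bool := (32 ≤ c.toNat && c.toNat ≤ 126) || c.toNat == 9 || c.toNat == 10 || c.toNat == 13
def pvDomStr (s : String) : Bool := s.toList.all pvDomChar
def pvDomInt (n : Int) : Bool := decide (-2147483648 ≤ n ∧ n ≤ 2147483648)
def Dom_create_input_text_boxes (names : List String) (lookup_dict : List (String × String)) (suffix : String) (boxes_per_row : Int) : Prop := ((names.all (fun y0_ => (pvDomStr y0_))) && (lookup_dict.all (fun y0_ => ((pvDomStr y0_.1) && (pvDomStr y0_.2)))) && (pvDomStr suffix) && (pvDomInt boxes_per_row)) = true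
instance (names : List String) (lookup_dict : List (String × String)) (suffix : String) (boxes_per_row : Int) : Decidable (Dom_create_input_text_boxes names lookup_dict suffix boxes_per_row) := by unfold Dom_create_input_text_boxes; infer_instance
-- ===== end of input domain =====

-- B builds the per-field box strings first and then groups them into explicit rows (slices of
-- boxes_per_row joined by '<br><br>') instead of A's flat loop with an index-modulo break test;
-- objective: simpler decomposition, same cost.

-- str.title() (exact for the printable-ASCII domain: a letter is uppercased iff the previous
-- character is not a letter, otherwise lowercased; ported by hand, PySem has no title)
def pvTitleGo : Bool → List Char → List Char
  | _, [] => []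
  | prev, c :: cs =>
    (if PySem.Chars.isalpha c then
        (if prev then PySem.Chars.lowerChar c else PySem.Chars.upperChar c)
      else c) :: pvTitleGo (PySem.Chars.isalpha c) cs

-- the f-string template shared verbatim by both Python versions (label + input + suffix),
-- including the 'tpye' typo and the line-continuation whitespace
def pvBox (name value suffix : List Char) : List Char :=
  "            <label for=\"".toList ++ name ++ "\"><strong>".toList
    ++ pvTitleGo false (PySem.Chars.replace name "_".toList " ".toList)
    ++ ":</strong></label>            <input tpye=\"text\" name=\"".toList ++ name
    ++ "\" value=\"".toList ++ value ++ "\">".toList ++ suffix ++ "        ".toList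

-- ===== PORT A =====
def create_input_text_boxes (names : List String) (lookup_dict : List (String × String)) (suffix : String) (boxes_per_row : Int) : String :=
  let d := PySem.Dict.mk lookup_dict
  let html : Option (List Char) :=
    (PySem.List.enumerate names 0).foldl
      (fun acc p =>
        acc.bind (fun h =>
          (PySem.Dict.get? d p.2).map (fun value =>
            let h' := h ++ pvBox p.2.toList value.toList suffix.toList
            if PySem.Int.mod p.1 boxes_per_row == boxes_per_row - 1
                && p.1 != (names.length : Int) - 1
            then h' ++ "<br><br>".toList else h')))
      (some [])
  match html with
  | some h => String.ofList (h ++ "<br>".toList)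
  | none => ""   -- lookup_dict[name] raised KeyError: excluded by Pre_

-- ===== PORT B =====
def create_input_text_boxes_alt (names : List String) (lookup_dict : List (String × String)) (suffix : String) (boxes_per_row : Int) : String :=
  let d := PySem.Dict.mk lookup_dict
  let boxes? : Option (List (List Char)) :=
    names.mapM (fun name =>
      (PySem.Dict.get? d name).map (fun value =>
        pvBox name.toList value.toList suffix.toList))
  match boxes? with
  | none => ""   -- lookup_dict[name] raised KeyError: excluded by Pre_
  | some boxes =>
    let rows : List (List (List Char)) :=
      (PySem.List.pyRange 0 (boxes.length : Int) boxes_per_row).map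
        (fun i => PySem.List.slice boxes (some i) (some (i + boxes_per_row)))
    String.ofList
      (PySem.Chars.join "<br><br>".toList (rows.map (fun row => PySem.Chars.join [] row))
        ++ "<br>".toList)

-- ===== PRECONDITION & SPEC =====
-- Pre_ restricts to the row width's natural domain boxes_per_row ≥ 1 and to names all present in
-- lookup_dict: outside it A raises (KeyError on a missing name; ZeroDivisionError at
-- `i % boxes_per_row` when boxes_per_row = 0 and names ≠ []) or, for negative boxes_per_row,
-- returns an accidental single unbroken row because Python's modulo then never equals
-- boxes_per_row - 1 — an artefact of the modulo's sign, not a behaviour anyone would specify.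
def Pre_create_input_text_boxes (names : List String) (lookup_dict : List (String × String)) (suffix : String) (boxes_per_row : Int) : Prop :=
  (∀ name ∈ names, ((PySem.Dict.mk lookup_dict).get? name).isSome = true) ∧ 1 ≤ boxes_per_row
instance (names : List String) (lookup_dict : List (String × String)) (suffix : String) (boxes_per_row : Int) : Decidable (Pre_create_input_text_boxes names lookup_dict suffix boxes_per_row) := by unfold Pre_create_input_text_boxes; infer_instance

def pvWitness_create_input_text_boxes : List String × (List (String × String)) × String × Int :=
  (["ab_c", "d"], [("ab_c", "1"), ("d", "2")], "x", 4)

def Spec_create_input_text_boxes (names : List String) (lookup_dict : List (String × String)) (suffix : String) (boxes_per_row : Int) (out : String) : Prop := out = create_input_text_boxes_alt names lookup_dict suffix boxes_per_row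
instance (names : List String) (lookup_dict : List (String × String)) (suffix : String) (boxes_per_row : Int) (out : String) : Decidable (Spec_create_input_text_boxes names lookup_dict suffix boxes_per_row out) := by unfold Spec_create_input_text_boxes; infer_instance

-- ===== CLAIM (what is proved, stated in full; the proofs are below) =====
def Claim_equal_create_input_text_boxes : Prop := ∀ (names : List String) (lookup_dict : List (String × String)) (suffix : String) (boxes_per_row : Int), Dom_create_input_text_boxes names lookup_dict suffix boxes_per_row → Pre_create_input_text_boxes names lookup_dict suffix boxes_per_row → Spec_create_input_text_boxes names lookup_dict suffix boxes_per_row (create_input_text_boxes names lookup_dict suffix boxes_per_row)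
-- ===== LEMMAS AND PROOFS =====

-- the per-name box string when every lookup succeeds
def pvBx (d : PySem.Dict String String) (suffix : String) (name : String) : List Char :=
  pvBox name.toList (((PySem.Dict.get? d name).getD "").toList) suffix.toList

-- chunks of size b (b ≥ 1): take b, recurse on drop b
def pvChunks (b : Nat) : List (List Char) → List (List (List Char))
  | [] => []
  | x :: xs => ((x :: xs).take b) :: pvChunks b (xs.drop (b - 1))
  termination_by l => l.length
  decreasing_by simp only [List.length_drop, List.length_cons]; omega

theorem pvChunks_cons (b : Nat) (hb : 1 ≤ b) (x : List Char) (xs : List (List Char)) :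
    pvChunks b (x :: xs) = ((x :: xs).take b) :: pvChunks b ((x :: xs).drop b) := by
  have : (x :: xs).drop b = xs.drop (b - 1) := by
    cases b with
    | zero => omega
    | succ n => simp
  rw [pvChunks.eq_2, this]

theorem pvChunks_ne_nil (b : Nat) (l : List (List Char)) (h : l ≠ []) : pvChunks b l ≠ [] := by
  cases l with
  | nil => exact absurd rfl h
  | cons x xs => rw [pvChunks.eq_2]; simp

theorem pvModAdd (bpr : Int) (hb : 0 < bpr) (i0 : Int) (hmod : PySem.Int.mod i0 bpr = 0)
    (j : Int) (h0 : 0 ≤ j) (hj : j < bpr) : PySem.Int.mod (i0 + j) bpr = j := by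
  rw [PySem.Int.mod_eq_emod_of_pos hb] at hmod ⊢
  obtain ⟨k, hk⟩ := Int.dvd_of_emod_eq_zero hmod
  subst hk
  rw [add_comm, Int.add_mul_emod_self_left]
  exact Int.emod_eq_of_lt h0 hj

-- pyRange peel for a positive step
theorem pvPyRange_stop (a n b : Int) (h : ¬ a < n) (hb : 0 < b) :
    PySem.List.pyRange a n b = [] := by
  unfold PySem.List.pyRange
  simp [h, hb]

theorem pvPyRange_cons (a n b : Int) (hb : 0 < b) (h : a < n) :
    PySem.List.pyRange a n b = a :: PySem.List.pyRange (a + b) n b := by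
  unfold PySem.List.pyRange
  simp only [if_neg (by omega : ¬ b = 0), if_pos hb, if_pos h]
  have hcount : (n - a + b - 1) / b = (n - (a + b) + b - 1) / b + 1 := by
    have : n - a + b - 1 = (n - (a+b) + b - 1) + 1 * b := by ring
    rw [this, Int.add_mul_ediv_right _ _ (by omega : b ≠ 0)]
  by_cases h2 : a + b < n
  · simp only [if_pos h2]
    rw [hcount]
    have hnn : 0 ≤ (n - (a+b) + b - 1) / b := by
      apply Int.ediv_nonneg <;> omega
    rw [show ((n - (a+b) + b - 1) / b + 1).toNat = ((n - (a+b) + b - 1) / b).toNat + 1 by omega]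
    rw [List.range_succ_eq_map]
    simp only [List.map_cons, List.map_map]
    congr 1
    · ring
    · apply List.map_congr_left; intro k _; simp only [Function.comp_apply, Nat.succ_eq_add_one]; push_cast; ring
  · simp only [if_neg h2]
    have h1 : (n - a + b - 1) / b = 1 := by
      have hlo : b ≤ n - a + b - 1 := by omega
      have hhi : n - a + b - 1 < 2 * b := by omega
      have := Int.ediv_le_ediv (by omega : (0:Int) < b) hlo
      have h2' : (n - a + b - 1) / b < 2 := by
        apply Int.ediv_lt_of_lt_mul hb; omega
      have h3' : 1 ≤ (n - a + b - 1) / b := by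
        rw [Int.le_ediv_iff_mul_le hb]; omega
      omega
    rw [h1]
    simp

-- one row of the flat loop: all break tests before the last element are false
theorem pvFoldRow (cond : Int → Bool) (f : String → List Char) (sep : List Char)
    (c : List String) :
    ∀ (i0 : Int) (h : List Char),
    (∀ j : Nat, j + 1 < c.length → cond (i0 + j) = false) →
    List.foldl (fun h p => let h' := h ++ f p.2; if cond p.1 then h' ++ sep else h') h
      (PySem.List.enumerate c i0)
    = if c.isEmpty then h
      else h ++ PySem.Chars.join [] (c.map f)
             ++ (if cond (i0 + c.length - 1) then sep else []) := by
  induction c with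
  | nil => intro i0 h _; simp [PySem.List.enumerate]
  | cons x xs ih =>
    intro i0 h hcond
    rw [PySem.List.enumerate_cons, List.foldl_cons]
    cases xs with
    | nil =>
      simp only [List.isEmpty_cons, List.map_cons, List.map_nil, PySem.Chars.join_singleton,
        List.length_cons, List.length_nil]
      have heq : i0 + ((0:Nat) + 1 : Nat) - 1 = i0 := by push_cast; ring
      by_cases hc : cond i0
      · simp [PySem.List.enumerate, hc]
      · simp [PySem.List.enumerate, hc]
    | cons y ys =>
      have hc0 : cond i0 = false := by
        have := hcond 0 (by simp)
        simpa using this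
      show List.foldl _ (if cond i0 then h ++ f x ++ sep else h ++ f x) _ = _
      rw [if_neg (by simp [hc0])]
      rw [ih (i0 + 1) (h ++ f x) (fun j hj => by
        have h2 := hcond (j + 1) (by simp only [List.length_cons] at hj ⊢; omega)
        have h3 : i0 + 1 + (j : Int) = i0 + ((j + 1 : Nat) : Int) := by push_cast; ring
        rw [h3]; exact h2)]
      simp only [List.isEmpty_cons, Bool.false_eq_true, if_false]
      have hjoin : PySem.Chars.join [] ((x :: y :: ys).map f)
          = f x ++ PySem.Chars.join [] ((y :: ys).map f) := by
        simp [PySem.Chars.join_cons_cons]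
      have hlen : i0 + 1 + ((y :: ys).length : Int) - 1 = i0 + ((x :: y :: ys).length : Int) - 1 := by
        simp; ring
      rw [hjoin, hlen]
      simp [List.append_assoc]

-- the flat loop equals the chunked join, starting at any row boundary i0
theorem pvLoopChunks (f : String → List Char) (bpr : Int) (hb : 0 < bpr) (L : Int) :
    ∀ (N : Nat) (rem : List String), rem.length ≤ N → ∀ (i0 : Int) (h : List Char),
    PySem.Int.mod i0 bpr = 0 → 0 ≤ i0 → L = i0 + rem.length →
    List.foldl (fun h p =>
        let h' := h ++ f p.2
        if PySem.Int.mod p.1 bpr == bpr - 1 && p.1 != L - 1 then h' ++ "<br><br>".toList else h') h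
      (PySem.List.enumerate rem i0)
    = h ++ PySem.Chars.join "<br><br>".toList
        ((pvChunks bpr.toNat (rem.map f)).map (PySem.Chars.join [])) := by
  intro N
  induction N with
  | zero =>
    intro rem hlen i0 h _ _ _
    have : rem = [] := List.eq_nil_of_length_eq_zero (by omega)
    subst this
    simp [PySem.List.enumerate, pvChunks]
  | succ N ih =>
    intro rem hlen i0 h hmod hi0 hL
    cases hrem : rem with
    | nil => subst hrem; simp [PySem.List.enumerate, pvChunks]
    | cons r rs =>
    subst hrem
    set c := (r :: rs).take bpr.toNat with hc
    set rest := (r :: rs).drop bpr.toNat with hrest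
    have hsplit : (r :: rs) = c ++ rest := (List.take_append_drop _ _).symm
    have hbN : 1 ≤ bpr.toNat := by omega
    have hclen : c.length ≤ bpr.toNat := by simp [hc]
    have hcne : c ≠ [] := by
      simp only [hc]
      cases h' : bpr.toNat with
      | zero => omega
      | succ m => simp
    have hlensum : ((r :: rs).length : Int) = c.length + rest.length := by
      rw [hsplit]; simp
    rw [hsplit, PySem.List.enumerate_append, List.foldl_append]
    have hrow := pvFoldRow (fun i => PySem.Int.mod i bpr == bpr - 1 && i != L - 1) f
        "<br><br>".toList c i0 h (by
      intro j hj
      have hjb : (j : Int) < bpr - 1 := by omega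
      have hmj : PySem.Int.mod (i0 + j) bpr = j :=
        pvModAdd bpr hb i0 hmod j (Int.natCast_nonneg j) (by omega)
      simp only [hmj]
      have hne : ((j : Int) == bpr - 1) = false := by simp; omega
      simp [hne])
    simp only [] at hrow
    rw [hrow, if_neg (by simp [hcne])]
    beta_reduce
    by_cases hrest0 : rest = []
    · -- c is the only (and last) chunk: the break test at its last element is false
      have hcl : (c.length : Int) = (r :: rs).length := by
        rw [hlensum]; simp [hrest0]
      have hcondf : (PySem.Int.mod (i0 + ↑c.length - 1) bpr == bpr - 1
          && (i0 + ↑c.length - 1) != L - 1) = false := by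
        by_cases hfull : c.length = bpr.toNat
        · have : i0 + ↑c.length - 1 = L - 1 := by omega
          simp [this]
        · have hmj : PySem.Int.mod (i0 + (↑c.length - 1)) bpr = ↑c.length - 1 :=
            pvModAdd bpr hb i0 hmod _ (by have hc0 : 0 < c.length := List.length_pos_of_ne_nil hcne; omega) (by omega)
          have harg : i0 + ↑c.length - 1 = i0 + (↑c.length - 1) := by ring
          rw [harg, hmj]
          have : ((c.length : Int) - 1 == bpr - 1) = false := by simp; omega
          simp [this]
      rw [hcondf]
      simp only [Bool.false_eq_true, if_false, List.append_nil]
      have hchunks : pvChunks bpr.toNat ((c ++ rest).map f) = [c.map f] := by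
        rw [hrest0, List.append_nil]
        obtain ⟨z, zs, hz⟩ := List.exists_cons_of_ne_nil (by simp [hcne] :
          c.map f ≠ ([] : List (List Char)))
        rw [hz, pvChunks_cons _ hbN, ← hz]
        have h1 : (c.map f).take bpr.toNat = c.map f := by
          apply List.take_of_length_le; simp [hclen]
        have h2 : (c.map f).drop bpr.toNat = [] := by
          apply List.drop_eq_nil_of_le; simp [hclen]
        rw [h1, h2, pvChunks]
      rw [hchunks]
      simp [hrest0, PySem.Chars.join_singleton]
    · -- c is a full chunk followed by more: the break fires, recurse
      have hrne : 0 < rest.length := List.length_pos_of_ne_nil hrest0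
      have hclb : c.length = bpr.toNat := by
        simp only [hrest, List.length_drop] at hrne
        simp only [hc, List.length_take]
        omega
      have hcast : (c.length : Int) = bpr := by rw [hclb]; omega
      have hcondt : (PySem.Int.mod (i0 + ↑c.length - 1) bpr == bpr - 1
          && (i0 + ↑c.length - 1) != L - 1) = true := by
        have hmj : PySem.Int.mod (i0 + (bpr - 1)) bpr = bpr - 1 :=
          pvModAdd bpr hb i0 hmod (bpr - 1) (by omega) (by omega)
        have harg : i0 + ↑c.length - 1 = i0 + (bpr - 1) := by omega
        have hLne : i0 + ↑c.length - 1 ≠ L - 1 := by omega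
        rw [harg, hmj]
        simp only [beq_self_eq_true, Bool.true_and, bne_iff_ne, ne_eq]
        rw [← harg]
        exact hLne
      rw [hcondt]
      simp only [if_pos]
      rw [ih rest (by
            have : rest.length = (r :: rs).length - bpr.toNat := by simp [hrest]
            simp only [List.length_cons] at hlen this ⊢
            omega)
          (i0 + ↑c.length) _ (by
            rw [hcast]
            rw [PySem.Int.mod_eq_emod_of_pos hb] at hmod ⊢
            have harg : i0 + bpr = i0 + bpr * 1 := by ring
            rw [harg, Int.add_mul_emod_self_left]
            exact hmod)
          (by omega)
          (by omega)]
      have hchunks : pvChunks bpr.toNat ((c ++ rest).map f)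
          = (c.map f) :: pvChunks bpr.toNat (rest.map f) := by
        obtain ⟨z, zs, hz⟩ := List.exists_cons_of_ne_nil (by simp [hcne] :
          (c ++ rest).map f ≠ ([] : List (List Char)))
        rw [hz, pvChunks_cons _ hbN, ← hz]
        have h1 : ((c ++ rest).map f).take bpr.toNat = c.map f := by
          rw [List.map_append, List.take_append_of_le_length (by simp [hclb]),
            List.take_of_length_le (by simp [hclb])]
        have h2 : ((c ++ rest).map f).drop bpr.toNat = rest.map f := by
          rw [List.map_append, List.drop_append_of_le_length (by simp [hclb]),
            List.drop_eq_nil_of_le (by simp [hclb]), List.nil_append]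
        rw [h1, h2]
      rw [hchunks]
      obtain ⟨z, zs, hz⟩ := List.exists_cons_of_ne_nil
        (pvChunks_ne_nil bpr.toNat (rest.map f) (by simp [hrest0]))
      rw [hz]
      simp only [List.map_cons, PySem.Chars.join_cons_cons]
      simp [List.append_assoc]

theorem pvSlices (b : Int) (hb : 0 < b) (l : List (List Char)) :
    ∀ (M : Nat) (k : Nat), l.length - k ≤ M →
    (PySem.List.pyRange (k : Int) (l.length : Int) b).map
      (fun i => PySem.List.slice l (some i) (some (i + b))) = pvChunks b.toNat (l.drop k) := by
  intro M
  induction M with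
  | zero =>
    intro k hk
    have hnk : ¬ ((k : Int) < (l.length : Int)) := by omega
    rw [pvPyRange_stop _ _ _ hnk hb, List.drop_eq_nil_of_le (by omega)]
    simp [pvChunks]
  | succ M ih =>
    intro k hk
    by_cases hlt : (k : Int) < (l.length : Int)
    · rw [pvPyRange_cons _ _ _ hb hlt, List.map_cons]
      have hcast : (k : Int) + b = ((k + b.toNat : Nat) : Int) := by push_cast; omega
      have hhead : PySem.List.slice l (some (k : Int)) (some ((k : Int) + b))
          = (l.drop k).take b.toNat := by
        rw [hcast, PySem.List.slice_natCast]
        congr 1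
        omega
      have htail := ih (k + b.toNat) (by omega)
      rw [← hcast] at htail
      rw [htail, hhead]
      have hdne : l.drop k ≠ [] := by
        intro hnil
        have := congrArg List.length hnil
        simp at this
        omega
      obtain ⟨z, zs, hz⟩ := List.exists_cons_of_ne_nil hdne
      rw [hz, pvChunks_cons _ (by omega), ← hz, ← List.drop_drop]
    · rw [pvPyRange_stop _ _ _ hlt hb, List.drop_eq_nil_of_le (by omega)]
      simp [pvChunks]

-- stripping the Option from A's fold when every lookup succeeds
theorem pvStripA (d : PySem.Dict String String) (suffix : String) (cond : Int → Bool) (sep : List Char) :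
    ∀ (ps : List (Int × String)) (h : List Char),
    (∀ p ∈ ps, ((PySem.Dict.get? d p.2).isSome = true)) →
    List.foldl (fun acc (p : Int × String) =>
        acc.bind (fun h =>
          (PySem.Dict.get? d p.2).map (fun value =>
            let h' := h ++ pvBox p.2.toList value.toList suffix.toList
            if cond p.1 then h' ++ sep else h'))) (some h) ps
    = some (List.foldl (fun h p =>
        let h' := h ++ pvBx d suffix p.2
        if cond p.1 then h' ++ sep else h') h ps) := by
  intro ps
  induction ps with
  | nil => intro h _; rfl
  | cons q qs ih =>
    intro h hall
    have hq := hall q (List.mem_cons_self ..)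
    obtain ⟨v, hv⟩ := Option.isSome_iff_exists.mp hq
    simp only [List.foldl_cons, hv, Option.bind_some, Option.map_some]
    rw [ih _ (fun p hp => hall p (List.mem_cons_of_mem _ hp))]
    simp [pvBx, hv]

-- stripping the Option from B's mapM when every lookup succeeds
theorem pvStripB (d : PySem.Dict String String) (suffix : String) :
    ∀ (names : List String),
    (∀ name ∈ names, ((PySem.Dict.get? d name).isSome = true)) →
    names.mapM (fun name =>
      (PySem.Dict.get? d name).map (fun value =>
        pvBox name.toList value.toList suffix.toList))
    = some (names.map (pvBx d suffix)) := by
  intro names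
  induction names with
  | nil => intro _; rfl
  | cons n ns ih =>
    intro hall
    have hn := hall n (List.mem_cons_self ..)
    obtain ⟨v, hv⟩ := Option.isSome_iff_exists.mp hn
    rw [List.mapM_cons]
    simp [hv, ih (fun p hp => hall p (List.mem_cons_of_mem _ hp)), pvBx]

-- the two pure computations agree for boxes_per_row ≥ 1
theorem pvMainEq (names : List String) (lookup_dict : List (String × String)) (suffix : String)
    (bpr : Int) (hall : ∀ name ∈ names, ((PySem.Dict.mk lookup_dict).get? name).isSome = true)
    (hbpos : 0 < bpr) :
    create_input_text_boxes names lookup_dict suffix bpr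
      = create_input_text_boxes_alt names lookup_dict suffix bpr := by
  simp only [create_input_text_boxes, create_input_text_boxes_alt]
  have hA := pvStripA (PySem.Dict.mk lookup_dict) suffix
      (fun i => PySem.Int.mod i bpr == bpr - 1 && i != (names.length : Int) - 1)
      "<br><br>".toList (PySem.List.enumerate names 0) [] (by
        intro p hp
        rw [PySem.List.mem_enumerate_iff] at hp
        obtain ⟨k, hk, rfl⟩ := hp
        exact hall _ (List.getElem_mem hk))
  beta_reduce at hA
  rw [hA, pvStripB (PySem.Dict.mk lookup_dict) suffix names hall]
  simp only []
  apply congrArg String.ofList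
  apply congrArg (· ++ "<br>".toList)
  have hmain := pvLoopChunks (pvBx (PySem.Dict.mk lookup_dict) suffix) bpr hbpos
      (names.length : Int) names.length names (le_refl _) 0 [] (by
        rw [PySem.Int.mod_eq_emod_of_pos hbpos]; exact Int.zero_emod bpr)
      (le_refl 0) (by simp)
  beta_reduce at hmain
  rw [hmain]
  have hsl := pvSlices bpr hbpos (names.map (pvBx (PySem.Dict.mk lookup_dict) suffix))
      (names.map (pvBx (PySem.Dict.mk lookup_dict) suffix)).length 0 (by omega)
  simp only [Nat.cast_zero, List.drop_zero] at hsl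
  rw [hsl]
  simp

-- ===== VERDICT (by name: the statement is the Claim_ definition above) =====
theorem create_input_text_boxes_spec : Claim_equal_create_input_text_boxes := by
  unfold Claim_equal_create_input_text_boxes
  intro names lookup_dict suffix bpr _ hpre
  unfold Spec_create_input_text_boxes
  exact pvMainEq names lookup_dict suffix bpr hpre.1 (by have h := hpre.2; omega)
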